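-- pv_equiv track=rewrite | github.com/BaileyChoi/Coding_test | 프로그래머스/0/181880. 1로 만들기/1로 만들기.py | solution
-- ===== SOURCE A (Python) =====
-- def solution(num_list):
--     answer = 0
--
--     for n in num_list:
--         count = 0
--
--         while n != 1:
--             n //= 2
--             count += 1
--
--         answer += count
--
--     return answer
-- ===== SOURCE B (Python) =====
-- def solution(num_list):
--     return sum(n.bit_length() - 1 for n in num_list)
-- ===== Notes on version B (the rewrite author's own statement) =====
-- stated objective: idiomatic
-- what changed: replaces the per-element halving while-loop with the closed form n.bit_length() - 1 summed in one pass
import Mathlib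
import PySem

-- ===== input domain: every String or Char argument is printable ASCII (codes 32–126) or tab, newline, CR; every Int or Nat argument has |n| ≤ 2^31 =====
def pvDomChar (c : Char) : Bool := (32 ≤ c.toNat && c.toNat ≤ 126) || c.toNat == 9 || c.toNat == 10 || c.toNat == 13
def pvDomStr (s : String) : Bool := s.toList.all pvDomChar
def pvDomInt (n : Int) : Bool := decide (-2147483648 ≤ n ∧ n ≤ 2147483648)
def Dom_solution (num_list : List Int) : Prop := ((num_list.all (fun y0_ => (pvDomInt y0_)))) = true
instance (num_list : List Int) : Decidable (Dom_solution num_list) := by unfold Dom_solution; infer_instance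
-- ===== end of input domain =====

-- B replaces A's per-element halving while-loop by the closed form bit_length(n) - 1 summed in one pass.


-- ===== PORT A =====
-- the while-loop 'while n != 1: n //= 2; count += 1'; fuel = n.toNat only makes the
-- recursion total, it is never exhausted when 1 ≤ n
def solutionLoop (fuel : Nat) (n : Int) (count : Int) : Int :=
  match fuel with
  | 0 => count
  | fuel + 1 =>
    if n ≠ 1 then solutionLoop fuel (PySem.Int.floordiv n 2) (count + 1) else count

def solution (num_list : List Int) : Int :=
  num_list.foldl (fun answer n => answer + solutionLoop n.toNat n 0) 0

-- ===== PORT B =====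
def solution_alt (num_list : List Int) : Int :=
  (num_list.map (fun n => (PySem.Int.bitLength n : Int) - 1)).sum

-- ===== PRECONDITION & SPEC =====
-- A's while-loop never terminates on an element n ≤ 0 (n //= 2 never reaches 1), so A only returns when every element is ≥ 1.
def Pre_solution (num_list : List Int) : Prop := ∀ n ∈ num_list, 1 ≤ n
instance (num_list : List Int) : Decidable (Pre_solution num_list) := by unfold Pre_solution; infer_instance
def pvWitness_solution : List Int := [1, 2, 7, 1024]

def Spec_solution (num_list : List Int) (out : Int) : Prop := out = solution_alt num_list
instance (num_list : List Int) (out : Int) : Decidable (Spec_solution num_list out) := by unfold Spec_solution; infer_instance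

-- ===== CLAIM (what is proved, stated in full; the proofs are below) =====
def Claim_equal_solution : Prop := ∀ (num_list : List Int), Dom_solution num_list → Pre_solution num_list → Spec_solution num_list (solution num_list)

-- ===== LEMMAS AND PROOFS =====
lemma solutionLoop_eq (fuel : Nat) : ∀ (n count : Int), 1 ≤ n → n.toNat ≤ fuel →
    solutionLoop fuel n count = count + ((PySem.Int.bitLength n : Int) - 1) := by
  induction fuel with
  | zero => intro n count h1 h2; omega
  | succ fuel ih =>
    intro n count h1 h2
    by_cases hn1 : n = 1
    · subst hn1; simp [solutionLoop]; decide
    · have h2n : 2 ≤ n := by omega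
      have hfd : PySem.Int.floordiv n 2 = n / 2 :=
        PySem.Int.floordiv_eq_ediv_of_pos (by omega)
      have hge : 1 ≤ n / 2 := by omega
      have hlt : (n / 2).toNat ≤ fuel := by omega
      have hbl : PySem.Int.bitLength n = PySem.Int.bitLength (PySem.Int.floordiv n 2) + 1 :=
        PySem.Int.bitLength_of_pos (by omega)
      rw [solutionLoop, if_pos hn1, hfd, ih (n / 2) (count + 1) hge hlt, hbl, hfd]
      push_cast
      ring

lemma solution_foldl (num_list : List Int) (h : ∀ n ∈ num_list, 1 ≤ n) (acc : Int) :
    num_list.foldl (fun answer n => answer + solutionLoop n.toNat n 0) acc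
      = acc + (num_list.map (fun n => (PySem.Int.bitLength n : Int) - 1)).sum := by
  induction num_list generalizing acc with
  | nil => simp
  | cons x xs ih =>
    have hx : 1 ≤ x := h x (by simp)
    simp only [List.foldl_cons, List.map_cons, List.sum_cons]
    rw [solutionLoop_eq x.toNat x 0 hx le_rfl, ih (fun n hn => h n (by simp [hn]))]
    ring

-- ===== VERDICT (by name: the statement is the Claim_ definition above) =====
theorem solution_spec : Claim_equal_solution := by
  intro num_list _ hpre
  show solution num_list = solution_alt num_list
  unfold solution solution_alt
  rw [solution_foldl num_list hpre 0, zero_add]
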